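-- pv_equiv track=rewrite | github.com/verba-neo/multi-it-ai-2 | p121683-외톨이알파벳/하정수.py | solution
-- ===== SOURCE A (Python) =====
-- def solution(input_string):
--     first = []   # 처음 나온 알파벳 저장 리스트(확인 겸용)
--     lone = []   # 두 번 나와서 외톨이가 된 알파벳 리스트
--     now = -1   # 리스트 인덱싱을 위해 -1로 초기화
--     for char in input_string:
--         if now == -1:   # 첫 알파벳은
--             first.append(char)   # first리스트에 저장하고
--             now += 1   # 현재 인덱스 수정
--         else:
--             if char not in first:   # 처음나온 알파벳이면
--                 first.append(char)   # first리스트에 저장하고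
--                 now += 1   # 현재 인덱스 수정
--             else:
--                 if char != first[now]:   # 처음 나온 알파벳이 아닌경우 이전 알파벳과 다를 때
--                     first.append(char)   # 현재 알파벳을 first리스트에 저장하고(다음과 현재가 같은지 확인하기 위해)
--                     now += 1   # 현재 인덱스 수정
--                     lone.append(char)   # 외톨이 알파벳에 추가
-- # sort 후 set을 하여 계산 시 pycharm에서는 정상작동하지만 제출시 순서가 바뀌지 않음
--     cal = []   # 계산용 리스트를 초기화
--     for char in set(lone):   # set한 외톨이 알파벳을
--         cal.append(char)   # 계산리스트에 추가하고
--     cal.sort()   # sort하여 순서를 정렬한다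
--
--     answer = ""   # answer에 저장한다
--     for char in cal:
--         answer += char
--
--     if lone:   # 외톨이알파벳이 있으면 저장한 값을 반환하고
--         return answer
--     else:   # 없으면 "N"을 추가하여 반환한다
--         answer = "N"
--         return answer
-- ===== SOURCE B (Python) =====
-- def solution(input_string):
--     # pass 1: run-length compress (keep a char only when it differs from the previous kept one)
--     compressed = []
--     prev = None
--     for ch in input_string:
--         if ch != prev:
--             compressed.append(ch)
--             prev = ch
--     # pass 2: frequency table over the compressed string
--     counts = {}
--     for ch in compressed:
--         counts[ch] = counts.get(ch, 0) + 1
--     # pass 3: a letter is 'lone' iff it occurs >= 2 times in the compressed string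
--     result = "".join(sorted(ch for ch, n in counts.items() if n > 1))
--     return result if result else "N"
-- ===== Notes on version B (the rewrite author's own statement) =====
-- stated objective: idiomatic
-- what changed: A interleaves compression and lone-detection in one stateful loop with an index and a per-character list-membership scan, then copies a set into a list to sort; B decomposes into three clean passes: run-length compress, build a frequency table, then join the sorted characters whose compressed count exceeds 1.
import Mathlib
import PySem

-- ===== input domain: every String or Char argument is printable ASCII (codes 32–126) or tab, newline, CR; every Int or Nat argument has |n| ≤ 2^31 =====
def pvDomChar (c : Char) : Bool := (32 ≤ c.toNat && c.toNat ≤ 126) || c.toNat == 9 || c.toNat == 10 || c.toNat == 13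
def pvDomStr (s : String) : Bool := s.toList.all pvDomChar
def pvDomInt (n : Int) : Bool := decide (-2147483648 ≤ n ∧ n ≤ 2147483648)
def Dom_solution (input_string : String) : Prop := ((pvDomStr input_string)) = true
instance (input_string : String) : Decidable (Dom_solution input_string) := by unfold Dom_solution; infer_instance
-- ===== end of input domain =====

-- B replaces A's single stateful loop (index `now`, membership tests, copy-set-then-sort) by three
-- passes: run-length compression, a frequency table, and a sorted filter of the letters of count > 1.

-- ===== PORT A =====
def solutionStepA (st : List Char × List Char × Int) (char : Char) : List Char × List Char × Int :=
  match st with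
  | (first, lone, now) =>
    if now = -1 then (first ++ [char], lone, now + 1)
    else if char ∉ first then (first ++ [char], lone, now + 1)
    else if PySem.List.pyGet? first now ≠ some char then
      (first ++ [char], lone ++ [char], now + 1)
    else (first, lone, now)

def solution (input_string : String) : String :=
  let st := input_string.toList.foldl solutionStepA ([], [], -1)
  let cal := PySem.List.sorted (PySem.Set.ofList st.2.1) (fun x => x) false
  let answer := cal.foldl (fun acc char => acc ++ [char]) ([] : List Char)
  if st.2.1 ≠ [] then String.ofList answer else "N"

-- ===== PORT B =====
def solution_alt (input_string : String) : String :=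
  let cp := input_string.toList.foldl
    (fun (st : List Char × Option Char) ch =>
      if st.2 ≠ some ch then (st.1 ++ [ch], some ch) else st) ([], none)
  let counts := cp.1.foldl (fun d ch => d.insert ch (d.getD ch 0 + 1)) (PySem.Dict.empty : PySem.Dict Char Int)
  let result := PySem.List.sorted ((counts.items.filter (fun p => 1 < p.2)).map Prod.fst)
    (fun x => x) false
  let resStr := PySem.Chars.join [] (result.map (fun c => [c]))
  if resStr = [] then "N" else String.ofList resStr

-- ===== PRECONDITION & SPEC =====
def Spec_solution (input_string : String) (out : String) : Prop := out = solution_alt input_string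
instance (input_string : String) (out : String) : Decidable (Spec_solution input_string out) := by unfold Spec_solution; infer_instance

-- ===== CLAIM (what is proved, stated in full; the proofs are below) =====
def Claim_equal_solution : Prop := ∀ (input_string : String), Dom_solution input_string → Spec_solution input_string (solution input_string)

-- ===== LEMMAS AND PROOFS =====

-- the run-length compression both loops compute, continuing from `acc`
def compressFrom (acc : List Char) : List Char → List Char
  | [] => acc
  | c :: rest => if acc.getLast? = some c then compressFrom acc rest
                 else compressFrom (acc ++ [c]) rest

def loneFrom (acc : List Char) : List Char → List Char
  | [] => []
  | c :: rest => if acc.getLast? = some c then loneFrom acc rest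
                 else (if c ∈ acc then [c] else []) ++ loneFrom (acc ++ [c]) rest

theorem compressFrom_prefix (l acc : List Char) : acc <+: compressFrom acc l := by
  induction l generalizing acc with
  | nil => simp [compressFrom]
  | cons c rest ih =>
    simp only [compressFrom]
    split
    · exact ih acc
    · exact (List.prefix_append acc [c]).trans (ih (acc ++ [c]))

theorem pyGet?_last (first : List Char) (h : first ≠ []) :
    PySem.List.pyGet? first ((first.length : Int) - 1) = first.getLast? := by
  have hl : 0 < first.length := List.length_pos_iff.mpr h
  have he : ((first.length : Int) - 1) = ((first.length - 1 : Nat) : Int) := by omega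
  rw [he, PySem.List.pyGet?_natCast, List.getLast?_eq_getElem?]

theorem loopA_eq (l first lone : List Char) :
    l.foldl solutionStepA (first, lone, (first.length : Int) - 1) =
      (compressFrom first l, lone ++ loneFrom first l,
        ((compressFrom first l).length : Int) - 1) := by
  induction l generalizing first lone with
  | nil => simp [compressFrom, loneFrom]
  | cons c rest ih =>
    simp only [List.foldl_cons, compressFrom, loneFrom]
    by_cases hfe : first = []
    · subst hfe
      have hstep : solutionStepA ([], lone, (0 : Int) - 1) c = ([c], lone, 0) := by
        simp [solutionStepA]
      simp only [List.length_nil, Nat.cast_zero, hstep]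
      have : ((0 : Int)) = (([c] : List Char).length : Int) - 1 := by simp
      rw [this, ih [c] lone]
      simp
    · have hne : ((first.length : Int) - 1) ≠ -1 := by
        have : 0 < first.length := List.length_pos_iff.mpr hfe
        omega
      by_cases hmem : c ∈ first
      · rw [show solutionStepA (first, lone, (first.length : Int) - 1) c =
            (if PySem.List.pyGet? first ((first.length : Int) - 1) ≠ some c then
              (first ++ [c], lone ++ [c], (first.length : Int) - 1 + 1)
            else (first, lone, (first.length : Int) - 1)) by
          simp [solutionStepA, hne, hmem]]
        rw [pyGet?_last first hfe]
        by_cases hlast : first.getLast? = some c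
        · rw [if_neg (by simp [hlast]), if_pos hlast, if_pos hlast]
          exact ih first lone
        · rw [if_pos (by simp [hlast]), if_neg hlast, if_neg hlast, if_pos hmem]
          have : ((first.length : Int) - 1 + 1) = ((first ++ [c]).length : Int) - 1 := by
            simp
          rw [this, ih (first ++ [c]) (lone ++ [c])]
          simp
      · have hlast : ¬ first.getLast? = some c := by
          intro h
          exact hmem (List.mem_of_getLast? h)
        rw [show solutionStepA (first, lone, (first.length : Int) - 1) c =
            (first ++ [c], lone, (first.length : Int) - 1 + 1) by
          simp [solutionStepA, hne, hmem]]
        rw [if_neg hlast, if_neg hlast, if_neg hmem]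
        have : ((first.length : Int) - 1 + 1) = ((first ++ [c]).length : Int) - 1 := by
          simp
        rw [this, ih (first ++ [c]) lone]
        simp

theorem loopB_eq (l acc : List Char) :
    (l.foldl (fun (st : List Char × Option Char) ch =>
        if st.2 ≠ some ch then (st.1 ++ [ch], some ch) else st) (acc, acc.getLast?)).1 =
      compressFrom acc l := by
  induction l generalizing acc with
  | nil => simp [compressFrom]
  | cons c rest ih =>
    simp only [List.foldl_cons, compressFrom]
    by_cases hlast : acc.getLast? = some c
    · rw [if_neg (by simp [hlast]), if_pos hlast]
      exact ih acc
    · rw [if_pos (by simp [hlast]), if_neg hlast]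
      have : some c = (acc ++ [c]).getLast? := by simp
      rw [this]
      exact ih (acc ++ [c])

theorem mem_loneFrom_iff (c : Char) (l acc : List Char) :
    c ∈ loneFrom acc l ↔ max (acc.count c) 1 + 1 ≤ (compressFrom acc l).count c := by
  induction l generalizing acc with
  | nil => simp [loneFrom, compressFrom]
  | cons x rest ih =>
    simp only [loneFrom, compressFrom]
    by_cases hlast : acc.getLast? = some x
    · rw [if_pos hlast, if_pos hlast]; exact ih acc
    · rw [if_neg hlast, if_neg hlast]
      by_cases hcx : c = x
      · subst hcx
        by_cases hmem : c ∈ acc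
        · rw [if_pos hmem]
          constructor
          · intro _
            have h1 : (acc ++ [c]).count c ≤ (compressFrom (acc ++ [c]) rest).count c :=
              (compressFrom_prefix rest (acc ++ [c])).count_le c
            have h2 : 1 ≤ acc.count c := List.one_le_count_iff.mpr hmem
            simp [List.count_append] at h1
            omega
          · intro _; simp
        · rw [if_neg hmem, List.nil_append, ih (acc ++ [c])]
          simp [List.count_append, List.count_eq_zero_of_not_mem hmem]
      · have hm : c ∈ (if x ∈ acc then [x] else []) ++ loneFrom (acc ++ [x]) rest ↔
            c ∈ loneFrom (acc ++ [x]) rest := by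
          split <;> simp [hcx]
        rw [hm, ih (acc ++ [x])]
        have h0 : List.count c [x] = 0 := List.count_eq_zero_of_not_mem (by simp [hcx])
        simp [List.count_append, h0]

theorem solution_eq_alt (s : String) : solution s = solution_alt s := by
  have hA : s.toList.foldl solutionStepA ([], [], -1) =
      (compressFrom [] s.toList, [] ++ loneFrom [] s.toList,
        ((compressFrom [] s.toList).length : Int) - 1) := by
    have := loopA_eq s.toList [] []
    simpa using this
  have hB : (s.toList.foldl (fun (st : List Char × Option Char) ch =>
      if st.2 ≠ some ch then (st.1 ++ [ch], some ch) else st) ([], none)).1 =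
      compressFrom [] s.toList := loopB_eq s.toList []
  simp only [solution, solution_alt, hA, hB]
  set C := compressFrom [] s.toList with hC
  set L := loneFrom [] s.toList with hL
  simp only [List.nil_append, PySem.List.foldl_append_singleton,
    PySem.Dict.foldl_insert_getD_add_one_eq_counter, PySem.Dict.items_counter]
  have hfm : ((List.map (fun k => (k, (List.count k C : Int))) (PySem.Set.ofList C)).filter
        (fun p => 1 < p.2)).map Prod.fst =
      (PySem.Set.ofList C).filter (fun k => 1 < (List.count k C : Int)) := by
    rw [List.filter_map, List.map_map]
    simp [Function.comp_def]
  rw [hfm]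
  have hmemL : ∀ a : Char, a ∈ L ↔ 2 ≤ List.count a C := by
    intro a
    rw [hL, mem_loneFrom_iff]
    simp [hC]
  have hperm : (PySem.Set.ofList L).Perm
      ((PySem.Set.ofList C).filter (fun k => 1 < (List.count k C : Int))) := by
    rw [List.perm_ext_iff_of_nodup (PySem.Set.nodup_ofList L)
      ((PySem.Set.nodup_ofList C).filter _)]
    intro a
    rw [PySem.Set.mem_ofList, List.mem_filter, PySem.Set.mem_ofList, hmemL a]
    constructor
    · intro h
      refine ⟨List.one_le_count_iff.mp (by omega), by simp; omega⟩
    · rintro ⟨_, h⟩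
      simp at h; omega
  have hsorted : PySem.List.sorted (PySem.Set.ofList L) (fun x => x) false =
      PySem.List.sorted ((PySem.Set.ofList C).filter (fun k => 1 < (List.count k C : Int)))
        (fun x => x) false :=
    PySem.List.sorted_eq_sorted_of_perm _ _ _ (fun _ _ h => h) hperm
  rw [PySem.Chars.join_nil_singletons, ← hsorted]
  have hiff : ((PySem.List.sorted (PySem.Set.ofList L) (fun x => x) false) = []) ↔ L = [] := by
    rw [PySem.List.sorted_eq_nil_iff]
    constructor
    · intro h
      by_contra hne
      rcases List.exists_mem_of_ne_nil L hne with ⟨a, ha⟩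
      have hm := (PySem.Set.mem_ofList L a).mpr ha
      simp [h] at hm
    · intro h
      refine List.eq_nil_iff_forall_not_mem.mpr (fun a ha => ?_)
      rw [PySem.Set.mem_ofList] at ha
      simp [h] at ha
  by_cases hLe : L = []
  · rw [if_neg (not_not_intro hLe), if_pos (hiff.mpr hLe)]
  · rw [if_pos hLe, if_neg (fun h => hLe (hiff.mp h))]

-- ===== VERDICT (by name: the statement is the Claim_ definition above) =====
theorem solution_spec : Claim_equal_solution := by
  intro s _
  unfold Spec_solution
  exact solution_eq_alt s
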